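-- pv_equiv track=rewrite | github.com/JasperKS/qs | solutions.py | threeBuildings
-- ===== SOURCE A (Python) =====
-- def threeBuildings(s):
--
-- 	#Dictionary to keep track of the buildings as we go through them
-- 	combi = {"0": 0, "1": 0, "01": 0, "10": 0, "010": 0, "101": 0}
--
-- 	#Loop through the buildings and increment the possible combinations accordingly
-- 	for ch in s:
--
-- 		#If the current building is 0 then we need to increment
-- 		#"0", "10". and "010"
-- 		if ch == "0":
-- 			combi["0"] += 1
-- 			combi["10"] += combi["1"]
-- 			combi["010"] += combi["01"]
--
-- 		#If the current building is 1 then we need to increment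
-- 		#"1", "01". and "101"
-- 		if ch == "1":
-- 			combi["1"] += 1
-- 			combi["01"] += combi["0"]
-- 			combi["101"] += combi["10"]
--
-- 	#Combine the possible "010" and "101" counts
-- 	return combi["010"] + combi["101"]
-- ===== SOURCE B (Python) =====
-- def threeBuildings(s):
--     total_zeros = s.count("0")
--     total_ones = s.count("1")
--     zeros_before = ones_before = 0
--     total = 0
--     for ch in s:
--         if ch == "1":
--             # "010" subsequences centred on this '1'
--             total += zeros_before * (total_zeros - zeros_before)
--             ones_before += 1
--         elif ch == "0":
--             # "101" subsequences centred on this '0'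
--             total += ones_before * (total_ones - ones_before)
--             zeros_before += 1
--     return total
-- ===== Notes on version B (the rewrite author's own statement) =====
-- stated objective: alternative
-- what changed: Instead of A's dict of six running subsequence counters, B pre-counts total zeros and ones and makes one pass adding, for each middle digit, zerosBefore*(zerosAfter) or onesBefore*(onesAfter), i.e. counts each pattern by its centre element.
import Mathlib
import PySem

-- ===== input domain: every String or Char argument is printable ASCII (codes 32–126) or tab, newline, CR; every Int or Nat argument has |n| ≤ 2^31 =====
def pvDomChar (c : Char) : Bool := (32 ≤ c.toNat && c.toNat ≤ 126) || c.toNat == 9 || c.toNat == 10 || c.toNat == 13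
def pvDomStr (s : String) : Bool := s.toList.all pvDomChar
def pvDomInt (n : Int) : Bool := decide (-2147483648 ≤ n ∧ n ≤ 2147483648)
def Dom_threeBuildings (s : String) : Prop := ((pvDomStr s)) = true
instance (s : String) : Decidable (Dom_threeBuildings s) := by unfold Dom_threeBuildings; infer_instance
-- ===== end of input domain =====

-- B re-counts each "010"/"101" pattern by its centre digit (pre-counted totals, one pass)
-- instead of A's dict of six running subsequence counters; same O(n) cost, different decomposition.

-- ===== PORT A =====
-- A's dict has the six fixed keys "0","1","01","10","010","101"; it is ported as a
-- 6-tuple of Int counters (c0, c1, c01, c10, c010, c101) updated in A's exact order.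
def threeBuildingsStepA (st : Int × Int × Int × Int × Int × Int) (ch : Char) :
    Int × Int × Int × Int × Int × Int :=
  let c0 := st.1; let c1 := st.2.1; let c01 := st.2.2.1
  let c10 := st.2.2.2.1; let c010 := st.2.2.2.2.1; let c101 := st.2.2.2.2.2
  -- if ch == "0": combi["0"] += 1; combi["10"] += combi["1"]; combi["010"] += combi["01"]
  let c0 := if ch = '0' then c0 + 1 else c0
  let c10 := if ch = '0' then c10 + c1 else c10
  let c010 := if ch = '0' then c010 + c01 else c010
  -- if ch == "1": combi["1"] += 1; combi["01"] += combi["0"]; combi["101"] += combi["10"]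
  let c1 := if ch = '1' then c1 + 1 else c1
  let c01 := if ch = '1' then c01 + c0 else c01
  let c101 := if ch = '1' then c101 + c10 else c101
  (c0, c1, c01, c10, c010, c101)

def threeBuildings (s : String) : Int :=
  let f := s.toList.foldl threeBuildingsStepA (0, 0, 0, 0, 0, 0)
  f.2.2.2.2.1 + f.2.2.2.2.2

-- ===== PORT B =====
-- state (zeros_before, ones_before, total); tz/t1 are the precomputed totals
def threeBuildingsStepB (tz t1 : Int) (st : Int × Int × Int) (ch : Char) :
    Int × Int × Int :=
  let zb := st.1; let ob := st.2.1; let total := st.2.2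
  if ch = '1' then (zb, ob + 1, total + zb * (tz - zb))
  else if ch = '0' then (zb + 1, ob, total + ob * (t1 - ob))
  else (zb, ob, total)

def threeBuildings_alt (s : String) : Int :=
  let tz : Int := PySem.Str.count s "0"
  let t1 : Int := PySem.Str.count s "1"
  (s.toList.foldl (threeBuildingsStepB tz t1) (0, 0, 0)).2.2

-- ===== PRECONDITION & SPEC =====
def Spec_threeBuildings (s : String) (out : Int) : Prop := out = threeBuildings_alt s
instance (s : String) (out : Int) : Decidable (Spec_threeBuildings s out) := by unfold Spec_threeBuildings; infer_instance

-- ===== CLAIM (what is proved, stated in full; the proofs are below) =====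
def Claim_equal_threeBuildings : Prop := ∀ (s : String), Dom_threeBuildings s → Spec_threeBuildings s (threeBuildings s)

-- ===== LEMMAS AND PROOFS =====

theorem stepA_zero (c0 c1 c01 c10 c010 c101 : Int) :
    threeBuildingsStepA (c0, c1, c01, c10, c010, c101) '0'
      = (c0 + 1, c1, c01, c10 + c1, c010 + c01, c101) := by
  simp [threeBuildingsStepA]

theorem stepA_one (c0 c1 c01 c10 c010 c101 : Int) :
    threeBuildingsStepA (c0, c1, c01, c10, c010, c101) '1'
      = (c0, c1 + 1, c01 + c0, c10, c010, c101 + c10) := by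
  simp [threeBuildingsStepA]

theorem stepA_other (c : Char) (h0 : ¬ c = '0') (h1 : ¬ c = '1')
    (c0 c1 c01 c10 c010 c101 : Int) :
    threeBuildingsStepA (c0, c1, c01, c10, c010, c101) c
      = (c0, c1, c01, c10, c010, c101) := by
  simp [threeBuildingsStepA, h0, h1]

theorem stepB_zero (tz t1 zb ob total : Int) :
    threeBuildingsStepB tz t1 (zb, ob, total) '0'
      = (zb + 1, ob, total + ob * (t1 - ob)) := by
  simp [threeBuildingsStepB]

theorem stepB_one (tz t1 zb ob total : Int) :
    threeBuildingsStepB tz t1 (zb, ob, total) '1'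
      = (zb, ob + 1, total + zb * (tz - zb)) := by
  simp [threeBuildingsStepB]

theorem stepB_other (c : Char) (h0 : ¬ c = '0') (h1 : ¬ c = '1')
    (tz t1 zb ob total : Int) :
    threeBuildingsStepB tz t1 (zb, ob, total) c = (zb, ob, total) := by
  simp [threeBuildingsStepB, h0, h1]

/-- Invariant linking A's six running counters to B's centre-based accumulator:
with totals `tz`/`t1` equal to zeros/ones seen so far plus those still to come, and
`acc = c010 + c101 + c01·(zeros to come) + c10·(ones to come)`, the two folds agree. -/
theorem threeBuildings_key (l : List Char) :
    ∀ (tz t1 c0 c1 c01 c10 c010 c101 acc : Int),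
      tz = c0 + l.count '0' → t1 = c1 + l.count '1' →
      acc = c010 + c101 + c01 * (l.count '0' : Int) + c10 * (l.count '1' : Int) →
      (let f := l.foldl threeBuildingsStepA (c0, c1, c01, c10, c010, c101)
       f.2.2.2.2.1 + f.2.2.2.2.2)
      = (l.foldl (threeBuildingsStepB tz t1) (c0, c1, acc)).2.2 := by
  induction l with
  | nil =>
    intro tz t1 c0 c1 c01 c10 c010 c101 acc _ _ hacc
    simp [List.foldl, hacc]
  | cons c t ih =>
    intro tz t1 c0 c1 c01 c10 c010 c101 acc htz ht1 hacc
    by_cases h0 : c = '0'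
    · subst h0
      rw [List.foldl_cons, List.foldl_cons, stepA_zero, stepB_zero]
      refine ih tz t1 (c0 + 1) c1 c01 (c10 + c1) (c010 + c01) c101 _ ?_ ?_ ?_
      · rw [htz]; simp; ring
      · rw [ht1]; simp
      · rw [hacc, ht1]; simp; ring
    · by_cases h1 : c = '1'
      · subst h1
        rw [List.foldl_cons, List.foldl_cons, stepA_one, stepB_one]
        refine ih tz t1 c0 (c1 + 1) (c01 + c0) c10 c010 (c101 + c10) _ ?_ ?_ ?_
        · rw [htz]; simp
        · rw [ht1]; simp; ring
        · rw [hacc, htz]; simp; ring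
      · rw [List.foldl_cons, List.foldl_cons, stepA_other c h0 h1, stepB_other c h0 h1]
        refine ih tz t1 c0 c1 c01 c10 c010 c101 acc ?_ ?_ ?_
        · rw [htz]; simp [h0]
        · rw [ht1]; simp [h1]
        · rw [hacc]; simp [h0, h1]

/-- `Chars.count.go` with a single-character pattern counts occurrences of that character. -/
theorem countGo_singleton (c : Char) (fuel : Nat) :
    ∀ (l : List Char) (acc : Nat), l.length ≤ fuel →
      PySem.Chars.count.go [c] fuel l acc = acc + l.count c := by
  induction fuel with
  | zero =>
    intro l acc h
    have hl : l = [] := List.eq_nil_of_length_eq_zero (Nat.le_zero.mp h)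
    subst hl
    simp [PySem.Chars.count.go]
  | succ n ih =>
    intro l acc h
    cases l with
    | nil => simp [PySem.Chars.count.go]
    | cons hd t =>
      by_cases hc : c = hd
      · subst hc
        have hp : List.isPrefixOf [c] (c :: t) = true := by
          simp [List.isPrefixOf]
        simp only [PySem.Chars.count.go, hp, if_true, List.length_cons, List.length_nil,
          List.drop_succ_cons, List.drop_zero, Nat.zero_add]
        rw [ih t (acc + 1) (by simpa using h)]
        simp
        omega
      · have hp : List.isPrefixOf [c] (hd :: t) = false := by
          simp only [List.isPrefixOf, Bool.and_true]
          exact beq_eq_false_iff_ne.mpr hc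
        simp only [PySem.Chars.count.go, hp, Bool.false_eq_true, if_false]
        rw [ih t acc (by simpa using h)]
        simp [Ne.symm hc]

/-- Python `s.count(ch)` for a single character is `List.count` on the code points. -/
theorem charsCount_singleton (l : List Char) (c : Char) :
    PySem.Chars.count l [c] = l.count c := by
  unfold PySem.Chars.count
  simp only [List.isEmpty_cons, Bool.false_eq_true, if_false]
  simpa using countGo_singleton c l.length l 0 le_rfl

-- ===== VERDICT (by name: the statement is the Claim_ definition above) =====
theorem threeBuildings_spec : Claim_equal_threeBuildings := by
  intro s _
  unfold Spec_threeBuildings threeBuildings threeBuildings_alt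
  have t0 : ("0" : String).toList = ['0'] := rfl
  have t1 : ("1" : String).toList = ['1'] := rfl
  have h0 : (PySem.Str.count s "0" : Int) = (s.toList.count '0' : Int) := by
    rw [PySem.Str.count_eq, t0, charsCount_singleton]
  have h1 : (PySem.Str.count s "1" : Int) = (s.toList.count '1' : Int) := by
    rw [PySem.Str.count_eq, t1, charsCount_singleton]
  simp only [h0, h1]
  exact threeBuildings_key s.toList _ _ 0 0 0 0 0 0 0 (by ring) (by ring) (by ring)
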